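-- pv_equiv track=rewrite | github.com/Izon731/library_Babylon | main.py | generate_book
-- ===== SOURCE A (Python) =====
-- def generate_book(book_number):
--     # Генерируем все комбинации из 4 цифр для этой книги
--     combinations = [f"{i:04}" for i in range(book_number * 70, (book_number + 1) * 70)]
--
--     # Создаём строки книги
--     book = []
--     for line_number in range(10):
--         # Создаём строку из 10 цифр
--         line = ""
--         for combo in combinations[line_number * 7: (line_number + 1) * 7]:
--             line += combo[:4]  # Берём первые 4 цифры комбинации
--         book.append(line)
--
--     return book
-- ===== SOURCE B (Python) =====
-- def generate_book(book_number):
--     # One flat 280-char string of all 70 truncated 4-char combos, then 28-char slices.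
--     all_digits = "".join(f"{book_number * 70 + i:04}"[:4] for i in range(70))
--     return [all_digits[k * 28:(k + 1) * 28] for k in range(10)]
-- ===== Notes on version B (the rewrite author's own statement) =====
-- stated objective: alternative
-- what changed: B joins all seventy truncated four-character formatted numbers into one flat string and slices it into ten fixed twenty-eight-character lines, instead of A's nested loop that slices a seven-element sublist per line and accumulates each line string combo by combo.
import Mathlib
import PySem

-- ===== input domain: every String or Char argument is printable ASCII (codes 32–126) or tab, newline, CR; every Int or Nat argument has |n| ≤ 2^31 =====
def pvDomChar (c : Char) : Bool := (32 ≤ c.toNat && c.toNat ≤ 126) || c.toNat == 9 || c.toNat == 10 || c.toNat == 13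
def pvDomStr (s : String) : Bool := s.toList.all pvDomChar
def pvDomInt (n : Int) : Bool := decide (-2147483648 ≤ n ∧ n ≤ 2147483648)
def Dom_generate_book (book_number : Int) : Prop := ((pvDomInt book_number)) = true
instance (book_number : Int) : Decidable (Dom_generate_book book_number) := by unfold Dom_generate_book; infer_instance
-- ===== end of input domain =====

-- B builds one flat 280-character string of the 70 truncated combos and slices it into
-- fixed 28-character lines, replacing A's nested per-line loop over a 7-element list slice
-- (objective: alternative decomposition, same cost).


-- shared helper used by both ports: Python's f"{i:04}" on an int — str(i) zero-padded
-- after the sign to total width 4 (ported by hand, exact for the format spec '04' on any int)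
def fmt04 (i : Int) : List Char :=
  let ds := PySem.Int.toChars (if i < 0 then -i else i)
  let sign : List Char := if i < 0 then ['-'] else []
  let w : Nat := if i < 0 then 3 else 4
  sign ++ List.replicate (w - ds.length) '0' ++ ds

-- ===== PORT A =====
def generate_book (book_number : Int) : List String :=
  let combinations : List (List Char) :=
    (PySem.List.pyRange (book_number * 70) ((book_number + 1) * 70) 1).map (fun i => fmt04 i)
  let book : List String :=
    (PySem.List.pyRange 0 10 1).foldl (fun book line_number =>
      let line : List Char :=
        (PySem.List.slice combinations (some (line_number * 7)) (some ((line_number + 1) * 7))).foldl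
          (fun line combo => line ++ combo.take 4) []     -- line += combo[:4]
      book ++ [String.ofList line]) []
  book

-- ===== PORT B =====
def generate_book_alt (book_number : Int) : List String :=
  let all_digits : List Char :=
    ((PySem.List.pyRange 0 70 1).map (fun i => (fmt04 (book_number * 70 + i)).take 4)).flatten  -- "".join
  (PySem.List.pyRange 0 10 1).map (fun k =>
    String.ofList (PySem.List.slice all_digits (some (k * 28)) (some ((k + 1) * 28))))

-- ===== PRECONDITION & SPEC =====
def Spec_generate_book (book_number : Int) (out : List String) : Prop := out = generate_book_alt book_number
instance (book_number : Int) (out : List String) : Decidable (Spec_generate_book book_number out) := by unfold Spec_generate_book; infer_instance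

-- ===== CLAIM (what is proved, stated in full; the proofs are below) =====
def Claim_equal_generate_book : Prop := ∀ (book_number : Int), Dom_generate_book book_number → Spec_generate_book book_number (generate_book book_number)

-- ===== LEMMAS AND PROOFS =====

lemma length_take4_fmt04 (i : Int) : ((fmt04 i).take 4).length = 4 := by
  have h4 : 4 ≤ (fmt04 i).length := by
    unfold fmt04
    split_ifs <;> simp <;> omega
  simp [List.length_take]; omega

lemma flatten_drop_mul (ts : List (List Char)) (h : ∀ t ∈ ts, t.length = 4) (k : Nat) :
    ts.flatten.drop (4 * k) = (ts.drop k).flatten := by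
  induction k generalizing ts with
  | zero => simp
  | succ k ih =>
    cases ts with
    | nil => simp
    | cons t rest =>
      have ht : t.length = 4 := h t (by simp)
      have he : 4 * (k + 1) = t.length + 4 * k := by omega
      rw [List.flatten_cons, he, List.drop_append, List.drop_succ_cons,
        List.drop_eq_nil_of_le (by omega), List.nil_append]
      have e : t.length + 4 * k - t.length = 4 * k := by omega
      rw [e]
      exact ih rest (fun t ht => h t (by simp [ht]))

lemma flatten_take_mul (ts : List (List Char)) (h : ∀ t ∈ ts, t.length = 4) (m : Nat) :
    ts.flatten.take (4 * m) = (ts.take m).flatten := by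
  induction m generalizing ts with
  | zero => simp
  | succ m ih =>
    cases ts with
    | nil => simp
    | cons t rest =>
      have ht : t.length = 4 := h t (by simp)
      have he : 4 * (m + 1) = t.length + 4 * m := by omega
      rw [List.flatten_cons, he, List.take_append, List.take_of_length_le (by omega),
        List.take_succ_cons, List.flatten_cons]
      have e : t.length + 4 * m - t.length = 4 * m := by omega
      rw [e, ih rest (fun t ht => h t (by simp [ht]))]

lemma line_eq (bn : Int) (n : Nat) :
    ((PySem.List.slice ((PySem.List.pyRange (bn * 70) ((bn + 1) * 70) 1).map (fun i => fmt04 i))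
        (some ((n : Int) * 7)) (some (((n : Int) + 1) * 7))).foldl
      (fun line combo => line ++ combo.take 4) [])
    = PySem.List.slice
        (((PySem.List.pyRange 0 70 1).map (fun i => (fmt04 (bn * 70 + i)).take 4)).flatten)
        (some ((n : Int) * 28)) (some (((n : Int) + 1) * 28)) := by
  set ts : List (List Char) :=
    (PySem.List.pyRange 0 70 1).map (fun i => (fmt04 (bn * 70 + i)).take 4) with hts
  have hlen : ∀ t ∈ ts, t.length = 4 := by
    intro t ht
    rw [hts] at ht
    obtain ⟨k, -, rfl⟩ := List.mem_map.mp ht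
    exact length_take4_fmt04 _
  have e1 : ((n : Int)) * 7 = ((n * 7 : Nat) : Int) := by push_cast; ring
  have e2 : ((n : Int) + 1) * 7 = ((n * 7 + 7 : Nat) : Int) := by push_cast; ring
  have e3 : ((n : Int)) * 28 = ((n * 28 : Nat) : Int) := by push_cast; ring
  have e4 : ((n : Int) + 1) * 28 = ((n * 28 + 28 : Nat) : Int) := by push_cast; ring
  rw [e1, e2, e3, e4, PySem.List.slice_natCast, PySem.List.slice_natCast,
    PySem.List.foldl_append_eq_flatMap (g := fun combo : List Char => combo.take 4)]
  have h7 : n * 7 + 7 - n * 7 = 7 := by omega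
  have h28 : n * 28 + 28 - n * 28 = 28 := by omega
  rw [h7, h28, List.nil_append, List.flatMap_def, List.map_take, List.map_drop]
  have hA : ((PySem.List.pyRange (bn * 70) ((bn + 1) * 70) 1).map (fun i => fmt04 i)).map
      (fun combo : List Char => combo.take 4) = ts := by
    rw [hts, PySem.List.pyRange_one, PySem.List.pyRange_one]
    have h70 : ((bn + 1) * 70 - bn * 70) = (70 : Int) := by ring
    rw [h70]
    norm_num [List.map_map, Function.comp_def]
  rw [hA]
  have hd : n * 28 = 4 * (n * 7) := by omega
  have ht28 : (28 : Nat) = 4 * 7 := by omega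
  rw [hd, flatten_drop_mul ts hlen, ht28,
    flatten_take_mul _ (fun t ht => hlen t (List.mem_of_mem_drop ht))]

-- ===== VERDICT (by name: the statement is the Claim_ definition above) =====
theorem generate_book_spec : Claim_equal_generate_book := by
  intro bn _
  unfold Spec_generate_book generate_book generate_book_alt
  show (PySem.List.pyRange 0 10 1).foldl (fun book line_number =>
      book ++ [String.ofList ((PySem.List.slice
          ((PySem.List.pyRange (bn * 70) ((bn + 1) * 70) 1).map (fun i => fmt04 i))
          (some (line_number * 7)) (some ((line_number + 1) * 7))).foldl
        (fun line combo => line ++ combo.take 4) [])]) [] = _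
  rw [PySem.List.foldl_append_singleton_eq_map, List.nil_append]
  apply List.map_congr_left
  intro ln hln
  rw [PySem.List.mem_pyRange_one] at hln
  obtain ⟨n, hn⟩ := Int.le.dest hln.1
  rw [zero_add] at hn
  subst hn
  exact congrArg String.ofList (line_eq bn n)
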